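-- pv_equiv track=rewrite | github.com/jasxnle/ICS_Search_Engine | main.py | seperateDict
-- ===== SOURCE A (Python) =====
-- def seperateDict(dict):
--
--     #a, b, c, d, e, f, g, h, i, j, k, l, m, n, o, p, q, r, s, t, u, v, w, x, y, z, spec = {}, {}, {}, {}, {}, {}, {}, {}, {}, {}, {}, {}, {}, {}, {}, {}, {}, {}, {}, {}, {}, {}, {}, {}, {}, {}, {}
--     a_f, g_l, m_s, t_z, spec = {}, {}, {}, {}, {}
--     #splitting indices
--     for key, val in dict.items():
--         if key[0] >= 'a' and key[0] <= 'f':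
--             a_f[key] = val
--         elif key[0] >= 'g' and key[0] <= 'l':
--             g_l[key] = val
--         elif key[0] >= 'm' and key[0] <= 's':
--             m_s[key] = val
--         elif key[0] >= 't' and key[0] <= 'z':
--             t_z[key] = val
--         else:
--             spec[key] = val
--
--     return a_f, g_l, m_s, t_z, spec
-- ===== SOURCE B (Python) =====
-- def seperateDict(dict):
--     items = dict.items()
--     a_f = {k: v for k, v in items if 'a' <= k[0] <= 'f'}
--     g_l = {k: v for k, v in items if 'g' <= k[0] <= 'l'}
--     m_s = {k: v for k, v in items if 'm' <= k[0] <= 's'}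
--     t_z = {k: v for k, v in items if 't' <= k[0] <= 'z'}
--     spec = {k: v for k, v in items if not ('a' <= k[0] <= 'z')}
--     return a_f, g_l, m_s, t_z, spec
-- ===== Notes on version B (the rewrite author's own statement) =====
-- stated objective: alternative
-- what changed: The single branching loop with chained elif branches is replaced by five independent dict comprehensions over the items, one per bucket, each with its own range test (spec is the exact negation of a-z); Pre_ excludes association lists with an empty-string key (A raises IndexError on key[0]) and with duplicate keys (which do not represent a Python dict).
-- outside the precondition, e.g. on seperateDict({'': [1]}): A raises IndexError, B raises IndexError
import Mathlib
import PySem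

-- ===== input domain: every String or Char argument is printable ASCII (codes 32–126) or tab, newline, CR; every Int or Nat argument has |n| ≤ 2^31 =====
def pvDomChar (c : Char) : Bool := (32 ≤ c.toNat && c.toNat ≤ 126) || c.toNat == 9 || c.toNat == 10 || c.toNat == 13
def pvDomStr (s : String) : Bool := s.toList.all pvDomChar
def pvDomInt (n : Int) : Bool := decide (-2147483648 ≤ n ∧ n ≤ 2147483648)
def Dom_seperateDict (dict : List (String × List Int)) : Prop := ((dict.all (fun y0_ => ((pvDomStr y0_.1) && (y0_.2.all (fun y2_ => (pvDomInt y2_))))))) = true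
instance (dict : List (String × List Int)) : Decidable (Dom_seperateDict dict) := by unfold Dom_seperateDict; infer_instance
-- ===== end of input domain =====

-- B differs by decomposition: five independent filtering passes (one per bucket, spec = exact negation of a-z) instead of one branching loop.
-- ===== PORT A =====
-- key[0] as a Char; the `.getD '\x00'` default is only reached on an empty key, which Pre_ excludes (Python: IndexError)
def pvFirst (key : String) : Char := (PySem.Str.pyGet? key 0).getD '\x00'

-- the loop body of A: chained if/elif on key[0], assignment into one of the five dicts
def pvStep (st : PySem.Dict String (List Int) × PySem.Dict String (List Int) × PySem.Dict String (List Int) × PySem.Dict String (List Int) × PySem.Dict String (List Int)) (kv : String × List Int) : PySem.Dict String (List Int) × PySem.Dict String (List Int) × PySem.Dict String (List Int) × PySem.Dict String (List Int) × PySem.Dict String (List Int) :=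
  let (a_f, g_l, m_s, t_z, spec) := st
  let c := pvFirst kv.1
  if 'a' ≤ c ∧ c ≤ 'f' then (a_f.insert kv.1 kv.2, g_l, m_s, t_z, spec)
  else if 'g' ≤ c ∧ c ≤ 'l' then (a_f, g_l.insert kv.1 kv.2, m_s, t_z, spec)
  else if 'm' ≤ c ∧ c ≤ 's' then (a_f, g_l, m_s.insert kv.1 kv.2, t_z, spec)
  else if 't' ≤ c ∧ c ≤ 'z' then (a_f, g_l, m_s, t_z.insert kv.1 kv.2, spec)
  else (a_f, g_l, m_s, t_z, spec.insert kv.1 kv.2)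

def seperateDict (dict : List (String × List Int)) : (List (String × List Int)) × (List (String × List Int)) × (List (String × List Int)) × (List (String × List Int)) × (List (String × List Int)) :=
  let st := dict.foldl pvStep (PySem.Dict.empty, PySem.Dict.empty, PySem.Dict.empty, PySem.Dict.empty, PySem.Dict.empty)
  (st.1.items, st.2.1.items, st.2.2.1.items, st.2.2.2.1.items, st.2.2.2.2.items)

-- ===== PORT B =====
def seperateDict_alt (dict : List (String × List Int)) : (List (String × List Int)) × (List (String × List Int)) × (List (String × List Int)) × (List (String × List Int)) × (List (String × List Int)) :=
  (dict.filter (fun kv => decide ('a' ≤ pvFirst kv.1 ∧ pvFirst kv.1 ≤ 'f')),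
   dict.filter (fun kv => decide ('g' ≤ pvFirst kv.1 ∧ pvFirst kv.1 ≤ 'l')),
   dict.filter (fun kv => decide ('m' ≤ pvFirst kv.1 ∧ pvFirst kv.1 ≤ 's')),
   dict.filter (fun kv => decide ('t' ≤ pvFirst kv.1 ∧ pvFirst kv.1 ≤ 'z')),
   dict.filter (fun kv => !decide ('a' ≤ pvFirst kv.1 ∧ pvFirst kv.1 ≤ 'z')))

-- ===== PRECONDITION & SPEC =====
-- Pre_ excludes association lists with an empty-string key (Python A raises IndexError on key[0])
-- and with duplicate keys (such a list does not represent a Python dict, whose keys are unique).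
def Pre_seperateDict (dict : List (String × List Int)) : Prop :=
  (∀ kv ∈ dict, kv.1 ≠ "") ∧ (dict.map Prod.fst).Nodup
instance (dict : List (String × List Int)) : Decidable (Pre_seperateDict dict) := by unfold Pre_seperateDict; infer_instance

def pvWitness_seperateDict : (List (String × List Int)) := [("apple", [1]), ("Goo", [2]), ("zed", [3])]

def Spec_seperateDict (dict : List (String × List Int)) (out : (List (String × List Int)) × (List (String × List Int)) × (List (String × List Int)) × (List (String × List Int)) × (List (String × List Int))) : Prop := out = seperateDict_alt dict
instance (dict : List (String × List Int)) (out : (List (String × List Int)) × (List (String × List Int)) × (List (String × List Int)) × (List (String × List Int)) × (List (String × List Int))) : Decidable (Spec_seperateDict dict out) := by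
  unfold Spec_seperateDict
  exact @instDecidableEqProd _ _ inferInstance (@instDecidableEqProd _ _ inferInstance (@instDecidableEqProd _ _ inferInstance (@instDecidableEqProd _ _ inferInstance inferInstance))) _ _

-- ===== CLAIM (what is proved, stated in full; the proofs are below) =====
def Claim_equal_seperateDict : Prop := ∀ (dict : List (String × List Int)), Dom_seperateDict dict → Pre_seperateDict dict → Spec_seperateDict dict (seperateDict dict)

-- ===== LEMMAS AND PROOFS =====

theorem pvRange1 (c : Char) : ('a' ≤ c ∧ c ≤ 'f') ↔ (97 ≤ c.toNat ∧ c.toNat ≤ 102) := by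
  rw [Char.le_def, Char.le_def, UInt32.le_iff_toNat_le, UInt32.le_iff_toNat_le]
  simp only [Char.toNat_val, show 'a'.toNat = 97 from rfl, show 'f'.toNat = 102 from rfl]
theorem pvRange2 (c : Char) : ('g' ≤ c ∧ c ≤ 'l') ↔ (103 ≤ c.toNat ∧ c.toNat ≤ 108) := by
  rw [Char.le_def, Char.le_def, UInt32.le_iff_toNat_le, UInt32.le_iff_toNat_le]
  simp only [Char.toNat_val, show 'g'.toNat = 103 from rfl, show 'l'.toNat = 108 from rfl]
theorem pvRange3 (c : Char) : ('m' ≤ c ∧ c ≤ 's') ↔ (109 ≤ c.toNat ∧ c.toNat ≤ 115) := by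
  rw [Char.le_def, Char.le_def, UInt32.le_iff_toNat_le, UInt32.le_iff_toNat_le]
  simp only [Char.toNat_val, show 'm'.toNat = 109 from rfl, show 's'.toNat = 115 from rfl]
theorem pvRange4 (c : Char) : ('t' ≤ c ∧ c ≤ 'z') ↔ (116 ≤ c.toNat ∧ c.toNat ≤ 122) := by
  rw [Char.le_def, Char.le_def, UInt32.le_iff_toNat_le, UInt32.le_iff_toNat_le]
  simp only [Char.toNat_val, show 't'.toNat = 116 from rfl, show 'z'.toNat = 122 from rfl]
theorem pvRangeZ (c : Char) : ('a' ≤ c ∧ c ≤ 'z') ↔ (97 ≤ c.toNat ∧ c.toNat ≤ 122) := by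
  rw [Char.le_def, Char.le_def, UInt32.le_iff_toNat_le, UInt32.le_iff_toNat_le]
  simp only [Char.toNat_val, show 'a'.toNat = 97 from rfl, show 'z'.toNat = 122 from rfl]

theorem pvInvariant (l : List (String × List Int))
    (a g m t s : PySem.Dict String (List Int))
    (hnd : (l.map Prod.fst).Nodup)
    (hfresh : ∀ k ∈ l.map Prod.fst,
      a.contains k = false ∧ g.contains k = false ∧ m.contains k = false ∧
      t.contains k = false ∧ s.contains k = false) :
    ((l.foldl pvStep (a, g, m, t, s)).1.items,
     (l.foldl pvStep (a, g, m, t, s)).2.1.items,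
     (l.foldl pvStep (a, g, m, t, s)).2.2.1.items,
     (l.foldl pvStep (a, g, m, t, s)).2.2.2.1.items,
     (l.foldl pvStep (a, g, m, t, s)).2.2.2.2.items)
    = (a.items ++ l.filter (fun kv => decide ('a' ≤ pvFirst kv.1 ∧ pvFirst kv.1 ≤ 'f')),
       g.items ++ l.filter (fun kv => decide ('g' ≤ pvFirst kv.1 ∧ pvFirst kv.1 ≤ 'l')),
       m.items ++ l.filter (fun kv => decide ('m' ≤ pvFirst kv.1 ∧ pvFirst kv.1 ≤ 's')),
       t.items ++ l.filter (fun kv => decide ('t' ≤ pvFirst kv.1 ∧ pvFirst kv.1 ≤ 'z')),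
       s.items ++ l.filter (fun kv => !decide ('a' ≤ pvFirst kv.1 ∧ pvFirst kv.1 ≤ 'z'))) := by
  induction l generalizing a g m t s with
  | nil => simp
  | cons kv rest ih =>
    obtain ⟨k, v⟩ := kv
    rw [List.map_cons, List.nodup_cons] at hnd
    have hknotin : k ∉ rest.map Prod.fst := hnd.1
    have hndrest : (rest.map Prod.fst).Nodup := hnd.2
    obtain ⟨ha, hg, hm, ht, hs⟩ := hfresh k (by simp)
    have hfr : ∀ d : PySem.Dict String (List Int), ∀ k' ∈ rest.map Prod.fst,
        (d.insert k v).contains k' = d.contains k' := by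
      intro d k' hk'
      rw [PySem.Dict.contains_insert]
      have : (k' == k) = false := by
        simp only [beq_eq_false_iff_ne, ne_eq]
        rintro rfl; exact hknotin hk'
      simp [this]
    have hfreshrest : ∀ k' ∈ rest.map Prod.fst,
        a.contains k' = false ∧ g.contains k' = false ∧ m.contains k' = false ∧
        t.contains k' = false ∧ s.contains k' = false :=
      fun k' hk' => hfresh k' (by simp [hk'])
    simp only [List.foldl_cons]
    by_cases h1 : ('a' ≤ pvFirst k ∧ pvFirst k ≤ 'f')
    · rw [show pvStep (a, g, m, t, s) (k, v) = (a.insert k v, g, m, t, s) by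
        simp [pvStep, h1]]
      rw [ih (a.insert k v) g m t s hndrest
        (fun k' hk' => ⟨by rw [hfr a k' hk']; exact (hfreshrest k' hk').1,
          (hfreshrest k' hk').2.1, (hfreshrest k' hk').2.2.1,
          (hfreshrest k' hk').2.2.2.1, (hfreshrest k' hk').2.2.2.2⟩)]
      rw [pvRange1] at h1
      rw [PySem.Dict.items_insert_of_not_contains a v ha]
      simp [List.filter_cons, pvRange1, pvRange2, pvRange3, pvRange4, pvRangeZ]; omega
    · by_cases h2 : ('g' ≤ pvFirst k ∧ pvFirst k ≤ 'l')
      · rw [show pvStep (a, g, m, t, s) (k, v) = (a, g.insert k v, m, t, s) by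
          simp [pvStep, h1, h2]]
        rw [ih a (g.insert k v) m t s hndrest
          (fun k' hk' => ⟨(hfreshrest k' hk').1,
            by rw [hfr g k' hk']; exact (hfreshrest k' hk').2.1, (hfreshrest k' hk').2.2.1,
            (hfreshrest k' hk').2.2.2.1, (hfreshrest k' hk').2.2.2.2⟩)]
        rw [pvRange2] at h2
        rw [PySem.Dict.items_insert_of_not_contains g v hg]
        simp [List.filter_cons, pvRange1, pvRange2, pvRange3, pvRange4, pvRangeZ]; omega
      · by_cases h3 : ('m' ≤ pvFirst k ∧ pvFirst k ≤ 's')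
        · rw [show pvStep (a, g, m, t, s) (k, v) = (a, g, m.insert k v, t, s) by
            simp [pvStep, h1, h2, h3]]
          rw [ih a g (m.insert k v) t s hndrest
            (fun k' hk' => ⟨(hfreshrest k' hk').1, (hfreshrest k' hk').2.1,
              by rw [hfr m k' hk']; exact (hfreshrest k' hk').2.2.1,
              (hfreshrest k' hk').2.2.2.1, (hfreshrest k' hk').2.2.2.2⟩)]
          rw [pvRange3] at h3
          rw [PySem.Dict.items_insert_of_not_contains m v hm]
          simp [List.filter_cons, pvRange1, pvRange2, pvRange3, pvRange4, pvRangeZ]; omega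
        · by_cases h4 : ('t' ≤ pvFirst k ∧ pvFirst k ≤ 'z')
          · rw [show pvStep (a, g, m, t, s) (k, v) = (a, g, m, t.insert k v, s) by
              simp [pvStep, h1, h2, h3, h4]]
            rw [ih a g m (t.insert k v) s hndrest
              (fun k' hk' => ⟨(hfreshrest k' hk').1, (hfreshrest k' hk').2.1,
                (hfreshrest k' hk').2.2.1,
                by rw [hfr t k' hk']; exact (hfreshrest k' hk').2.2.2.1,
                (hfreshrest k' hk').2.2.2.2⟩)]
            rw [pvRange4] at h4
            rw [PySem.Dict.items_insert_of_not_contains t v ht]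
            simp [List.filter_cons, pvRange1, pvRange2, pvRange3, pvRange4, pvRangeZ]; omega
          · rw [show pvStep (a, g, m, t, s) (k, v) = (a, g, m, t, s.insert k v) by
              simp [pvStep, h1, h2, h3, h4]]
            rw [ih a g m t (s.insert k v) hndrest
              (fun k' hk' => ⟨(hfreshrest k' hk').1, (hfreshrest k' hk').2.1,
                (hfreshrest k' hk').2.2.1, (hfreshrest k' hk').2.2.2.1,
                by rw [hfr s k' hk']; exact (hfreshrest k' hk').2.2.2.2⟩)]
            rw [pvRange1] at h1; rw [pvRange2] at h2; rw [pvRange3] at h3; rw [pvRange4] at h4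
            rw [PySem.Dict.items_insert_of_not_contains s v hs]
            simp [List.filter_cons, pvRange1, pvRange2, pvRange3, pvRange4, pvRangeZ]; omega

-- ===== VERDICT (by name: the statement is the Claim_ definition above) =====
theorem seperateDict_spec : Claim_equal_seperateDict := by
  intro dict _ hpre
  unfold Spec_seperateDict seperateDict seperateDict_alt
  have := pvInvariant dict PySem.Dict.empty PySem.Dict.empty PySem.Dict.empty PySem.Dict.empty PySem.Dict.empty hpre.2
    (by intro k _; simp [PySem.Dict.contains_empty])
  simpa using this
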